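-- pv_equiv track=rewrite | github.com/syedzuhairabbasrizvi/magic-wand | solution.py | get_adjacent_pixels
-- ===== SOURCE A (Python) =====
-- def get_adjacent_pixels(image, visited, row, col, color):
--     if row < 0 or row >= len(image) or col < 0 or col >= len(image[0]):
--         return 0
--
--     if visited[row][col] or image[row][col] != color:
--         return 0
--
--     visited[row][col] = True
--     count = 1
--
--     count += get_adjacent_pixels(image, visited, row + 1, col, color)
--     count += get_adjacent_pixels(image, visited, row - 1, col, color)
--     count += get_adjacent_pixels(image, visited, row, col + 1, color)
--     count += get_adjacent_pixels(image, visited, row, col - 1, color)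
--
--     return count
-- ===== SOURCE B (Python) =====
-- def get_adjacent_pixels(image, visited, row, col, color):
--     count = 0
--     stack = [(row, col)]
--     while stack:
--         r, c = stack.pop()
--         if r < 0 or r >= len(image) or c < 0 or c >= len(image[0]):
--             continue
--         if visited[r][c] or image[r][c] != color:
--             continue
--         visited[r][c] = True
--         count += 1
--         stack.extend([(r, c - 1), (r, c + 1), (r - 1, c), (r + 1, c)])
--     return count
-- ===== Notes on version B (the rewrite author's own statement) =====
-- stated objective: alternative
-- what changed: Replaces A's recursive four-way DFS with an iterative flood fill: an explicit LIFO stack seeded with (row, col), popping one coordinate per iteration, check-and-mark at pop time, pushing the four neighbours; same guards and same marking of visited, recursion eliminated.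
-- outside the precondition, e.g. on get_adjacent_pixels([[1], [2, 3]], [[True], [True, True]], 0, 0, 5): A returns 0, B returns 0
import Mathlib
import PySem

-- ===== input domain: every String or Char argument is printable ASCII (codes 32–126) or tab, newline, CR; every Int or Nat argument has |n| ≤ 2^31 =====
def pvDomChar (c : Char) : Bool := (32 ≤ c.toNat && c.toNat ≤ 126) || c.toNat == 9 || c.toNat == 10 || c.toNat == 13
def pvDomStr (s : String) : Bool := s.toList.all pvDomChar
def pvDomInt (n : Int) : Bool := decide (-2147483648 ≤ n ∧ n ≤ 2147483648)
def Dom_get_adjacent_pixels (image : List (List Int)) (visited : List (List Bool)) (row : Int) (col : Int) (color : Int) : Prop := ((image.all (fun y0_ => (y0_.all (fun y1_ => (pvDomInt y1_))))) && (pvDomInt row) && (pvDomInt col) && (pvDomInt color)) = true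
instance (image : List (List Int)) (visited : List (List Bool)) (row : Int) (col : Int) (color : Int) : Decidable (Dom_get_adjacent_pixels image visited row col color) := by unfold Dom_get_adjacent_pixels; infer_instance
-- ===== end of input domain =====

-- B replaces A's recursive four-way DFS by an iterative flood fill with an explicit stack
-- (same guards, check-and-mark at pop time); objective: alternative decomposition, no speed claim.
-- Both A and B mutate `visited` in place (they mark the same cells); the equivalence proved
-- here is about the RETURN value.

-- ===== PORT A =====
-- shared primitive ports: 2-D indexing (xs[r][c]) and in-place mark (visited[r][c] = True)
def pvGet2 {α : Type} (v : List (List α)) (r c : Int) : Option α :=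
  (PySem.List.pyGet? v r).bind (fun row => PySem.List.pyGet? row c)

def pvSet2 (v : List (List Bool)) (r c : Nat) : List (List Bool) :=
  v.set r ((v.getD r []).set c true)

-- number of unmarked cells: the termination measure of both ports
def pvCountFalse (v : List (List Bool)) : Nat :=
  (v.map (fun row => row.count false)).sum

-- marking an unmarked in-range cell strictly decreases the measure (cited by decreasing_by)
theorem pvCountRow_set_lt (row : List Bool) (c : Nat) (h : row[c]? = some false) :
    (row.set c true).count false < row.count false := by
  induction row generalizing c with
  | nil => simp at h
  | cons b bs ih =>
    cases c with
    | zero =>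
      simp at h
      subst h
      simp [List.count_cons]
    | succ c =>
      simp at h
      cases b <;> simpa [List.count_cons] using ih c h

theorem pvCountFalse_set_lt (v : List (List Bool)) (k m : Nat) (row : List Bool)
    (h1 : v[k]? = some row) (h2 : row[m]? = some false) :
    pvCountFalse (v.set k (row.set m true)) < pvCountFalse v := by
  induction v generalizing k with
  | nil => simp at h1
  | cons a as ih =>
    cases k with
    | zero =>
      simp at h1
      subst h1
      simp only [List.set_cons_zero, pvCountFalse, List.map_cons, List.sum_cons]
      exact Nat.add_lt_add_right (pvCountRow_set_lt _ m h2) _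
    | succ k =>
      simp at h1
      have := ih k h1
      simp only [List.set_cons_succ, pvCountFalse, List.map_cons, List.sum_cons] at this ⊢
      omega

theorem pvCountFalse_set2_lt (v : List (List Bool)) (r c : Int)
    (hr : 0 ≤ r) (hc : 0 ≤ c) (h : pvGet2 v r c = some false) :
    pvCountFalse (pvSet2 v r.toNat c.toNat) < pvCountFalse v := by
  unfold pvGet2 at h
  rw [PySem.List.pyGet?_of_nonneg v hr] at h
  cases hrow : v[r.toNat]? with
  | none => rw [hrow] at h; simp at h
  | some row =>
    rw [hrow] at h
    simp only [Option.bind_some] at h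
    rw [PySem.List.pyGet?_of_nonneg row hc] at h
    have hgd : v.getD r.toNat [] = row := by simp [List.getD, hrow]
    unfold pvSet2
    rw [hgd]
    exact pvCountFalse_set_lt v r.toNat c.toNat row hrow h

set_option maxHeartbeats 4000000 in
-- literal port of A's recursion; the subtype carries the invariant "the measure never grows",
-- which the mutation-based recursion needs for termination.  The second guard folds Python's
-- `visited[row][col] or image[row][col] != color` into one test; a `none` lookup (IndexError
-- in Python, outside Pre_) also lands in the 0-branch.
def pvDfsA (image : List (List Int)) (color : Int) (v : List (List Bool)) (r c : Int) :
    {p : Int × List (List Bool) // pvCountFalse p.2 ≤ pvCountFalse v} :=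
  if hg : r < 0 ∨ (image.length : Int) ≤ r ∨ c < 0 ∨ ((image.headD []).length : Int) ≤ c then
    ⟨(0, v), le_refl _⟩
  else if h2 : pvGet2 v r c ≠ some false ∨ pvGet2 image r c ≠ some color then
    ⟨(0, v), le_refl _⟩
  else
    have h1 : pvCountFalse (pvSet2 v r.toNat c.toNat) < pvCountFalse v :=
      pvCountFalse_set2_lt v r c (by omega) (by omega) (by push_neg at h2; exact h2.1)
    let d1 := pvDfsA image color (pvSet2 v r.toNat c.toNat) (r + 1) c
    let d2 := pvDfsA image color d1.val.2 (r - 1) c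
    let d3 := pvDfsA image color d2.val.2 r (c + 1)
    let d4 := pvDfsA image color d3.val.2 r (c - 1)
    ⟨(1 + d1.val.1 + d2.val.1 + d3.val.1 + d4.val.1, d4.val.2),
      le_trans d4.2 (le_trans d3.2 (le_trans d2.2 (le_trans d1.2 (le_of_lt h1))))⟩
termination_by pvCountFalse v
decreasing_by
  · exact h1
  · exact lt_of_le_of_lt d1.2 h1
  · exact lt_of_le_of_lt (le_trans d2.2 d1.2) h1
  · exact lt_of_le_of_lt (le_trans d3.2 (le_trans d2.2 d1.2)) h1

def get_adjacent_pixels (image : List (List Int)) (visited : List (List Bool)) (row : Int) (col : Int) (color : Int) : Int :=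
  (pvDfsA image color visited row col).val.1

-- ===== PORT B =====
set_option maxHeartbeats 1000000 in
-- literal port of B's while-loop: the Lean list is the stack, head = Python's list end
-- (pop() = take the head, extend = cons the four neighbours so they pop in the same order);
-- same guard folding as in port A
def pvLoopB (image : List (List Int)) (color : Int) (v : List (List Bool)) (stack : List (Int × Int)) (acc : Int) : Int :=
  match stack with
  | [] => acc
  | (r, c) :: rest =>
    if hg : r < 0 ∨ (image.length : Int) ≤ r ∨ c < 0 ∨ ((image.headD []).length : Int) ≤ c then
      pvLoopB image color v rest acc
    else if h2 : pvGet2 v r c ≠ some false ∨ pvGet2 image r c ≠ some color then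
      pvLoopB image color v rest acc
    else
      have h1 : pvCountFalse (pvSet2 v r.toNat c.toNat) < pvCountFalse v :=
        pvCountFalse_set2_lt v r c (by omega) (by omega) (by push_neg at h2; exact h2.1)
      pvLoopB image color (pvSet2 v r.toNat c.toNat)
        ((r + 1, c) :: (r - 1, c) :: (r, c + 1) :: (r, c - 1) :: rest) (acc + 1)
termination_by 5 * pvCountFalse v + stack.length
decreasing_by
  all_goals simp
  all_goals omega

def get_adjacent_pixels_alt (image : List (List Int)) (visited : List (List Bool)) (row : Int) (col : Int) (color : Int) : Int :=
  pvLoopB image color visited [(row, col)] 0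

-- ===== PRECONDITION & SPEC =====
-- Pre_ admits any input whose start cell is out of bounds (A returns 0 at once) and otherwise
-- requires the shapes to agree (rectangular image, `visited` shaped like `image`): with an
-- in-bounds start and mismatched shapes the Python recursion can hit an index past a row's end
-- and raise IndexError (on a few such inputs A happens to return 0 before reaching the bad
-- index; B returns 0 there too).
def Pre_get_adjacent_pixels (image : List (List Int)) (visited : List (List Bool)) (row : Int) (col : Int) (color : Int) : Prop :=
  row < 0 ∨ (image.length : Int) ≤ row ∨ col < 0 ∨ ((image.headD []).length : Int) ≤ col ∨
    ((∀ r ∈ image, r.length = (image.headD []).length) ∧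
     visited.length = image.length ∧
     (∀ r ∈ visited, r.length = (image.headD []).length))
instance (image : List (List Int)) (visited : List (List Bool)) (row : Int) (col : Int) (color : Int) : Decidable (Pre_get_adjacent_pixels image visited row col color) := by unfold Pre_get_adjacent_pixels; infer_instance

def pvWitness_get_adjacent_pixels : List (List Int) × List (List Bool) × Int × Int × Int :=
  ([[1, 1], [0, 1]], [[false, false], [false, false]], 0, 0, 1)

def Spec_get_adjacent_pixels (image : List (List Int)) (visited : List (List Bool)) (row : Int) (col : Int) (color : Int) (out : Int) : Prop := out = get_adjacent_pixels_alt image visited row col color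
instance (image : List (List Int)) (visited : List (List Bool)) (row : Int) (col : Int) (color : Int) (out : Int) : Decidable (Spec_get_adjacent_pixels image visited row col color out) := by unfold Spec_get_adjacent_pixels; infer_instance

-- ===== CLAIM (what is proved, stated in full; the proofs are below) =====
def Claim_equal_get_adjacent_pixels : Prop := ∀ (image : List (List Int)) (visited : List (List Bool)) (row : Int) (col : Int) (color : Int), Dom_get_adjacent_pixels image visited row col color → Pre_get_adjacent_pixels image visited row col color → Spec_get_adjacent_pixels image visited row col color (get_adjacent_pixels image visited row col color)

-- ===== LEMMAS AND PROOFS =====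

-- step equations for the two ports
theorem pvDfsA_guard (image : List (List Int)) (color : Int) (v : List (List Bool)) (r c : Int)
    (hg : r < 0 ∨ (image.length : Int) ≤ r ∨ c < 0 ∨ ((image.headD []).length : Int) ≤ c) :
    (pvDfsA image color v r c).val = (0, v) := by
  rw [pvDfsA.eq_def, dif_pos hg]

theorem pvDfsA_stop (image : List (List Int)) (color : Int) (v : List (List Bool)) (r c : Int)
    (hg : ¬(r < 0 ∨ (image.length : Int) ≤ r ∨ c < 0 ∨ ((image.headD []).length : Int) ≤ c))
    (h2 : pvGet2 v r c ≠ some false ∨ pvGet2 image r c ≠ some color) :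
    (pvDfsA image color v r c).val = (0, v) := by
  rw [pvDfsA.eq_def, dif_neg hg, dif_pos h2]

theorem pvDfsA_mark (image : List (List Int)) (color : Int) (v : List (List Bool)) (r c : Int)
    (hg : ¬(r < 0 ∨ (image.length : Int) ≤ r ∨ c < 0 ∨ ((image.headD []).length : Int) ≤ c))
    (h2 : ¬(pvGet2 v r c ≠ some false ∨ pvGet2 image r c ≠ some color)) :
    (pvDfsA image color v r c).val =
      (1 + (pvDfsA image color (pvSet2 v r.toNat c.toNat) (r + 1) c).val.1
         + (pvDfsA image color (pvDfsA image color (pvSet2 v r.toNat c.toNat) (r + 1) c).val.2 (r - 1) c).val.1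
         + (pvDfsA image color (pvDfsA image color (pvDfsA image color (pvSet2 v r.toNat c.toNat) (r + 1) c).val.2 (r - 1) c).val.2 r (c + 1)).val.1
         + (pvDfsA image color (pvDfsA image color (pvDfsA image color (pvDfsA image color (pvSet2 v r.toNat c.toNat) (r + 1) c).val.2 (r - 1) c).val.2 r (c + 1)).val.2 r (c - 1)).val.1,
       (pvDfsA image color (pvDfsA image color (pvDfsA image color (pvDfsA image color (pvSet2 v r.toNat c.toNat) (r + 1) c).val.2 (r - 1) c).val.2 r (c + 1)).val.2 r (c - 1)).val.2) := by
  rw [pvDfsA.eq_def, dif_neg hg, dif_neg h2]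

theorem pvLoopB_nil (image : List (List Int)) (color : Int) (v : List (List Bool)) (acc : Int) :
    pvLoopB image color v [] acc = acc := by
  rw [pvLoopB.eq_def]

theorem pvLoopB_guard (image : List (List Int)) (color : Int) (v : List (List Bool)) (r c : Int)
    (S : List (Int × Int)) (acc : Int)
    (hg : r < 0 ∨ (image.length : Int) ≤ r ∨ c < 0 ∨ ((image.headD []).length : Int) ≤ c) :
    pvLoopB image color v ((r, c) :: S) acc = pvLoopB image color v S acc := by
  rw [pvLoopB.eq_def]
  simp only [dif_pos hg]

theorem pvLoopB_stop (image : List (List Int)) (color : Int) (v : List (List Bool)) (r c : Int)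
    (S : List (Int × Int)) (acc : Int)
    (hg : ¬(r < 0 ∨ (image.length : Int) ≤ r ∨ c < 0 ∨ ((image.headD []).length : Int) ≤ c))
    (h2 : pvGet2 v r c ≠ some false ∨ pvGet2 image r c ≠ some color) :
    pvLoopB image color v ((r, c) :: S) acc = pvLoopB image color v S acc := by
  rw [pvLoopB.eq_def]
  simp only [dif_neg hg, dif_pos h2]

theorem pvLoopB_mark (image : List (List Int)) (color : Int) (v : List (List Bool)) (r c : Int)
    (S : List (Int × Int)) (acc : Int)
    (hg : ¬(r < 0 ∨ (image.length : Int) ≤ r ∨ c < 0 ∨ ((image.headD []).length : Int) ≤ c))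
    (h2 : ¬(pvGet2 v r c ≠ some false ∨ pvGet2 image r c ≠ some color)) :
    pvLoopB image color v ((r, c) :: S) acc
      = pvLoopB image color (pvSet2 v r.toNat c.toNat)
          ((r + 1, c) :: (r - 1, c) :: (r, c + 1) :: (r, c - 1) :: S) (acc + 1) := by
  rw [pvLoopB.eq_def]
  simp only [dif_neg hg, dif_neg h2]

-- simulation: processing (r,c) on top of the stack does exactly what one call of A's DFS does
theorem pvSim (image : List (List Int)) (color : Int) :
    ∀ (n : Nat) (v : List (List Bool)), pvCountFalse v < n →
      ∀ (r c : Int) (S : List (Int × Int)) (acc : Int),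
        pvLoopB image color v ((r, c) :: S) acc
          = pvLoopB image color (pvDfsA image color v r c).val.2 S
              (acc + (pvDfsA image color v r c).val.1) := by
  intro n
  induction n with
  | zero => intro v hv; omega
  | succ n ih =>
    intro v hv r c S acc
    by_cases hg : r < 0 ∨ (image.length : Int) ≤ r ∨ c < 0 ∨ ((image.headD []).length : Int) ≤ c
    · rw [pvLoopB_guard image color v r c S acc hg, pvDfsA_guard image color v r c hg]
      simp
    · by_cases h2 : pvGet2 v r c ≠ some false ∨ pvGet2 image r c ≠ some color
      · rw [pvLoopB_stop image color v r c S acc hg h2, pvDfsA_stop image color v r c hg h2]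
        simp
      · have hvf : pvGet2 v r c = some false := by push_neg at h2; exact h2.1
        have h1 : pvCountFalse (pvSet2 v r.toNat c.toNat) < pvCountFalse v :=
          pvCountFalse_set2_lt v r c (by omega) (by omega) hvf
        rw [pvLoopB_mark image color v r c S acc hg h2, pvDfsA_mark image color v r c hg h2]
        have hb1 : pvCountFalse (pvSet2 v r.toNat c.toNat) < n := by omega
        rw [ih _ hb1]
        have hb2 : pvCountFalse (pvDfsA image color (pvSet2 v r.toNat c.toNat) (r + 1) c).val.2 < n :=
          lt_of_le_of_lt (pvDfsA image color (pvSet2 v r.toNat c.toNat) (r + 1) c).2 hb1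
        rw [ih _ hb2]
        have hb3 : pvCountFalse (pvDfsA image color (pvDfsA image color (pvSet2 v r.toNat c.toNat) (r + 1) c).val.2 (r - 1) c).val.2 < n :=
          lt_of_le_of_lt (pvDfsA image color (pvDfsA image color (pvSet2 v r.toNat c.toNat) (r + 1) c).val.2 (r - 1) c).2 hb2
        rw [ih _ hb3]
        have hb4 : pvCountFalse (pvDfsA image color (pvDfsA image color (pvDfsA image color (pvSet2 v r.toNat c.toNat) (r + 1) c).val.2 (r - 1) c).val.2 r (c + 1)).val.2 < n :=
          lt_of_le_of_lt (pvDfsA image color (pvDfsA image color (pvDfsA image color (pvSet2 v r.toNat c.toNat) (r + 1) c).val.2 (r - 1) c).val.2 r (c + 1)).2 hb3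
        rw [ih _ hb4]
        congr 1
        ring

-- ===== VERDICT (by name: the statement is the Claim_ definition above) =====
theorem get_adjacent_pixels_spec : Claim_equal_get_adjacent_pixels := by
  intro image visited row col color _ _
  unfold Spec_get_adjacent_pixels get_adjacent_pixels get_adjacent_pixels_alt
  rw [pvSim image color (pvCountFalse visited + 1) visited (by omega) row col [] 0,
    pvLoopB_nil]
  omega
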